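-- pv_equiv track=rewrite | github.com/Timofejjj/AlgorithmBSU | 0.4_Canonical_View/code.py | search_root
-- ===== SOURCE A (Python) =====
-- def search_root(G, n):
--
--     for j in range(n):
--         is_root = True
--         for i in range(n):
--             if G[i][j] == 1:
--                 is_root = False
--                 break
--
--         if is_root:
--             return j
--     return None
-- ===== SOURCE B (Python) =====
-- def search_root(G, n):
--     has_incoming = set()
--     for i in range(n):
--         row = G[i]
--         for j in range(n):
--             if row[j] == 1:
--                 has_incoming.add(j)
--     for j in range(n):
--         if j not in has_incoming:
--             return j
--     return None
-- ===== Notes on version B (the rewrite author's own statement) =====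
-- stated objective: alternative
-- what changed: Replaced the per-column inner scan with early break by a single marking pass that collects all columns with an incoming edge into a set, followed by a scan for the first unmarked column.
-- outside the precondition, e.g. on search_root([[1, 1], [0]], 2): A returns None, B raises IndexError
import Mathlib
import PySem

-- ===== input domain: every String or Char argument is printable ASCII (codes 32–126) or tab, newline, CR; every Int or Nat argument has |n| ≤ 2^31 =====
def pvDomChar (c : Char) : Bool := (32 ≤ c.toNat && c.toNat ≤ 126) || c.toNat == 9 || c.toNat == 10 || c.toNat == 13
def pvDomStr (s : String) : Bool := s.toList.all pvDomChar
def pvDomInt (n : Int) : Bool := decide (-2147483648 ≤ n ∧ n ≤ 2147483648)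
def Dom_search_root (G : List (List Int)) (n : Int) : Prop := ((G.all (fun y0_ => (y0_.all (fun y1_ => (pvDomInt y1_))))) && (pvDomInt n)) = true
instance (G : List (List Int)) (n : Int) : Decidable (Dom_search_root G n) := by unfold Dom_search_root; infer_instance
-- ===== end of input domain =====

-- B replaces A's per-column early-break scan by one marking pass over all entries
-- (building the set of columns with an incoming edge) followed by a first-unmarked scan.
-- Same asymptotic cost; alternative algorithm.

-- ===== PORT A =====
-- inner 'for i in range(n): if G[i][j] == 1: break' — true = is_root stayed True
def search_root_colCheck (G : List (List Int)) (j : Int) : List Int → Bool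
  | [] => true
  | i :: rest =>
    if (PySem.List.pyGet? ((PySem.List.pyGet? G i).getD []) j).getD 0 = 1 then false
    else search_root_colCheck G j rest

def search_root_loop (G : List (List Int)) (n : Int) : List Int → Option Int
  | [] => none
  | j :: rest =>
    if search_root_colCheck G j (PySem.List.pyRange 0 n 1) then some j
    else search_root_loop G n rest

def search_root (G : List (List Int)) (n : Int) : Option Int :=
  search_root_loop G n (PySem.List.pyRange 0 n 1)

-- ===== PORT B =====
-- marking pass: the set of columns j with some G[i][j] == 1
def search_root_alt_mark (G : List (List Int)) (n : Int) : PySem.Set Int :=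
  (PySem.List.pyRange 0 n 1).foldl (fun s i =>
    (PySem.List.pyRange 0 n 1).foldl
      (fun s2 j => if (PySem.List.pyGet? ((PySem.List.pyGet? G i).getD []) j).getD 0 = 1
                   then PySem.Set.add s2 j else s2) s)
    PySem.Set.empty

-- 'for j in range(n): if j not in has_incoming: return j'
def search_root_alt_find (marked : PySem.Set Int) : List Int → Option Int
  | [] => none
  | j :: rest =>
    if PySem.Set.contains marked j then search_root_alt_find marked rest else some j

def search_root_alt (G : List (List Int)) (n : Int) : Option Int :=
  search_root_alt_find (search_root_alt_mark G n) (PySem.List.pyRange 0 n 1)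

-- ===== PRECONDITION & SPEC =====
-- Pre_ excludes matrices too small for the full n×n scan: there Python A raises IndexError,
-- or returns only thanks to its early break on inputs where B's full marking pass raises IndexError.
def Pre_search_root (G : List (List Int)) (n : Int) : Prop :=
  n ≤ (G.length : Int) ∧ ∀ row ∈ G.take n.toNat, n ≤ (row.length : Int)
instance (G : List (List Int)) (n : Int) : Decidable (Pre_search_root G n) := by
  unfold Pre_search_root; infer_instance

def pvWitness_search_root : List (List Int) × Int := ([[0, 1], [0, 0]], 2)

def Spec_search_root (G : List (List Int)) (n : Int) (out : Option Int) : Prop := out = search_root_alt G n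
instance (G : List (List Int)) (n : Int) (out : Option Int) : Decidable (Spec_search_root G n out) := by unfold Spec_search_root; infer_instance

-- ===== CLAIM (what is proved, stated in full; the proofs are below) =====
def Claim_equal_search_root : Prop := ∀ (G : List (List Int)) (n : Int), Dom_search_root G n → Pre_search_root G n → Spec_search_root G n (search_root G n)

-- ===== LEMMAS AND PROOFS =====

theorem colCheck_iff (G : List (List Int)) (j : Int) (l : List Int) :
    search_root_colCheck G j l = true ↔
      ∀ i ∈ l, (PySem.List.pyGet? ((PySem.List.pyGet? G i).getD []) j).getD 0 ≠ 1 := by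
  induction l with
  | nil => simp [search_root_colCheck]
  | cons i rest ih =>
    by_cases h : (PySem.List.pyGet? ((PySem.List.pyGet? G i).getD []) j).getD 0 = 1 <;>
      simp [search_root_colCheck, h, ih]

theorem mem_inner_fold (f : Int → Int) (jl : List Int) (s : PySem.Set Int) (x : Int) :
    x ∈ jl.foldl (fun s2 j => if f j = 1 then PySem.Set.add s2 j else s2) s ↔
      x ∈ s ∨ (x ∈ jl ∧ f x = 1) := by
  induction jl generalizing s with
  | nil => simp
  | cons j rest ih =>
    simp only [List.foldl_cons]
    by_cases h : f j = 1
    · rw [if_pos h, ih]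
      simp only [PySem.Set.mem_add, List.mem_cons]
      constructor
      · rintro ((hs | rfl) | hr)
        · exact Or.inl hs
        · exact Or.inr ⟨Or.inl rfl, h⟩
        · exact Or.inr ⟨Or.inr hr.1, hr.2⟩
      · rintro (hs | ⟨(rfl | hr), hx⟩)
        · exact Or.inl (Or.inl hs)
        · exact Or.inl (Or.inr rfl)
        · exact Or.inr ⟨hr, hx⟩
    · rw [if_neg h, ih]
      simp only [List.mem_cons]
      constructor
      · rintro (hs | hr)
        · exact Or.inl hs
        · exact Or.inr ⟨Or.inr hr.1, hr.2⟩
      · rintro (hs | ⟨(rfl | hr), hx⟩)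
        · exact Or.inl hs
        · exact absurd hx h
        · exact Or.inr ⟨hr, hx⟩

theorem mem_mark_fold (G : List (List Int)) (n : Int) (il : List Int) (s : PySem.Set Int) (x : Int) :
    x ∈ il.foldl (fun s i =>
        (PySem.List.pyRange 0 n 1).foldl
          (fun s2 j => if (PySem.List.pyGet? ((PySem.List.pyGet? G i).getD []) j).getD 0 = 1
                       then PySem.Set.add s2 j else s2) s) s ↔
      x ∈ s ∨ ∃ i ∈ il, x ∈ PySem.List.pyRange 0 n 1 ∧
        (PySem.List.pyGet? ((PySem.List.pyGet? G i).getD []) x).getD 0 = 1 := by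
  induction il generalizing s with
  | nil => simp
  | cons i rest ih =>
    simp only [List.foldl_cons, ih, mem_inner_fold, List.mem_cons]
    constructor
    · rintro ((hs | hx) | ⟨i', hi', hx⟩)
      · exact Or.inl hs
      · exact Or.inr ⟨i, Or.inl rfl, hx.1, hx.2⟩
      · exact Or.inr ⟨i', Or.inr hi', hx⟩
    · rintro (hs | ⟨i', (rfl | hi'), hx⟩)
      · exact Or.inl (Or.inl hs)
      · exact Or.inl (Or.inr hx)
      · exact Or.inr ⟨i', hi', hx⟩

theorem mem_mark (G : List (List Int)) (n : Int) (x : Int) :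
    x ∈ search_root_alt_mark G n ↔
      ∃ i ∈ PySem.List.pyRange 0 n 1, x ∈ PySem.List.pyRange 0 n 1 ∧
        (PySem.List.pyGet? ((PySem.List.pyGet? G i).getD []) x).getD 0 = 1 := by
  unfold search_root_alt_mark
  rw [mem_mark_fold]
  simp [PySem.Set.empty]

theorem loops_eq (G : List (List Int)) (n : Int) (jl : List Int)
    (hsub : ∀ j ∈ jl, j ∈ PySem.List.pyRange 0 n 1) :
    search_root_loop G n jl = search_root_alt_find (search_root_alt_mark G n) jl := by
  induction jl with
  | nil => rfl
  | cons j rest ih =>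
    have hj : j ∈ PySem.List.pyRange 0 n 1 := hsub j (List.mem_cons_self ..)
    have hkey : search_root_colCheck G j (PySem.List.pyRange 0 n 1) = true ↔
        ¬ (PySem.Set.contains (search_root_alt_mark G n) j = true) := by
      rw [colCheck_iff, PySem.Set.contains_iff, mem_mark]
      constructor
      · rintro h ⟨i, hi, _, h1⟩; exact h i hi h1
      · intro h i hi h1; exact h ⟨i, hi, hj, h1⟩
    simp only [search_root_loop, search_root_alt_find]
    by_cases hc : search_root_colCheck G j (PySem.List.pyRange 0 n 1) = true
    · rw [if_pos hc, if_neg (hkey.mp hc)]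
    · rw [if_neg hc]
      have : PySem.Set.contains (search_root_alt_mark G n) j = true := by
        by_contra hm; exact hc (hkey.mpr hm)
      rw [if_pos this]
      exact ih (fun j' hj' => hsub j' (List.mem_cons_of_mem _ hj'))

-- ===== VERDICT (by name: the statement is the Claim_ definition above) =====
theorem search_root_spec : Claim_equal_search_root := by
  intro G n _ _
  unfold Spec_search_root search_root search_root_alt
  exact loops_eq G n _ (fun j hj => hj)
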